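-- pv_equiv track=rewrite | github.com/alex-aparin/Puzzles | HackerRank/Algorithms/Implementation/day-of-the-programmer.py | prog_date
-- ===== SOURCE A (Python) =====
-- def prog_date(year):
--     if year <= 1918:
--         feb_offset = year % 4 == 0
--     else:
--         feb_offset = year % 400 == 0 or year % 4 == 0 and year % 100 != 0
--     days = [31, 28 + feb_offset - (year == 1918) * 13, 31, 30, 31, 30, 31, 31, 30, 31, 30, 31][::-1]
--     d, m = 0, 0
--     while d + days[-1] < 256:
--         m, d = m + 1, d + days.pop()
--     return (256 - d, m + 1, year)
-- ===== SOURCE B (Python) =====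
-- def prog_date(year):
--     if year <= 1918:
--         leap = year % 4 == 0
--     else:
--         leap = year % 400 == 0 or year % 4 == 0 and year % 100 != 0
--     feb_days = 28 + leap - (year == 1918) * 13
--     return (41 - feb_days, 9, year)
-- ===== Notes on version B (the rewrite author's own statement) =====
-- stated objective: simpler
-- what changed: The 256th day always falls in September, so B replaces A's month-accumulation while-loop over a reversed popped list with the closed form (41 - feb_days, 9, year), keeping only A's leap/Julian-transition February computation.
import Mathlib
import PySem

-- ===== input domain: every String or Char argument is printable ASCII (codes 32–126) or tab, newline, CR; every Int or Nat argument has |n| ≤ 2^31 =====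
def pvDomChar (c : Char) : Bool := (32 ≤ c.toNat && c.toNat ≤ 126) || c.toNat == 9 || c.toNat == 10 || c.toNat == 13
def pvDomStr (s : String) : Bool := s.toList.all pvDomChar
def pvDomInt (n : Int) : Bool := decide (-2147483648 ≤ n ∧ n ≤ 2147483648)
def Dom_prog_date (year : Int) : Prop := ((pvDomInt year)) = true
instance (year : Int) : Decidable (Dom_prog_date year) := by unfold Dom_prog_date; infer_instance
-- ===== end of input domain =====

-- B replaces A's month-accumulation while-loop with the closed form (41 - feb_days, 9, year): simpler.

-- ===== PORT A =====
-- the while loop: on the reversed list, days[-1] reads and pop() removes the LAST element,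
-- i.e. the loop consumes days.reverse head-first; progDateLoop takes the already-reversed list
-- and structurally consumes it from the front (exact for A's `while d + days[-1] < 256: m, d = m+1, d+days.pop()`)
def progDateLoopRev : List Int → Int → Int → Int × Int
  | [], d, m => (d, m)
  | x :: rest, d, m => if d + x < 256 then progDateLoopRev rest (d + x) (m + 1) else (d, m)

def progDateLoop (days : List Int) (d m : Int) : Int × Int := progDateLoopRev days.reverse d m

def prog_date (year : Int) : Int × Int × Int :=
  let feb_offset : Bool :=
    if year ≤ 1918 then PySem.Int.mod year 4 == 0
    else (PySem.Int.mod year 400 == 0 || (PySem.Int.mod year 4 == 0 && PySem.Int.mod year 100 != 0))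
  let days : List Int :=
    ([31, 28 + (if feb_offset then 1 else 0) - (if year == 1918 then 1 else 0) * 13,
      31, 30, 31, 30, 31, 31, 30, 31, 30, 31] : List Int).reverse
  let dm := progDateLoop days 0 0
  (256 - dm.1, dm.2 + 1, year)

-- ===== PORT B =====
def prog_date_alt (year : Int) : Int × Int × Int :=
  let leap : Bool :=
    if year ≤ 1918 then PySem.Int.mod year 4 == 0
    else (PySem.Int.mod year 400 == 0 || (PySem.Int.mod year 4 == 0 && PySem.Int.mod year 100 != 0))
  let feb_days : Int := 28 + (if leap then 1 else 0) - (if year == 1918 then 1 else 0) * 13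
  (41 - feb_days, 9, year)

-- ===== PRECONDITION & SPEC =====
def Spec_prog_date (year : Int) (out : Int × Int × Int) : Prop := out = prog_date_alt year
instance (year : Int) (out : Int × Int × Int) : Decidable (Spec_prog_date year out) := by unfold Spec_prog_date; infer_instance

-- ===== CLAIM (what is proved, stated in full; the proofs are below) =====
def Claim_equal_prog_date : Prop := ∀ (year : Int), Dom_prog_date year → Spec_prog_date year (prog_date year)

-- ===== LEMMAS AND PROOFS =====

-- ===== VERDICT (by name: the statement is the Claim_ definition above) =====
theorem prog_date_spec : Claim_equal_prog_date := by
  intro year _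
  unfold Spec_prog_date prog_date prog_date_alt
  by_cases h1918 : year = 1918
  · subst h1918; decide
  · have hne : (year == 1918) = false := by simp [h1918]
    by_cases hleap : (if year ≤ 1918 then PySem.Int.mod year 4 == 0
        else (PySem.Int.mod year 400 == 0 || (PySem.Int.mod year 4 == 0 && PySem.Int.mod year 100 != 0))) = true
    · simp only [hne, hleap, if_true, Bool.false_eq_true, if_false]
      norm_num
      decide
    · simp only [hne, eq_false_of_ne_true hleap, Bool.false_eq_true, if_false]
      norm_num
      decide
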